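-- pv_equiv track=rewrite | github.com/MattInglisWhalen/FastFactor | my_math.py | is_bpsw
-- ===== SOURCE A (Python) =====
-- def legendre(a, m):
--     return pow(a, (m - 1) >> 1, m)
--
-- def is_sprp(n, b=2):
--     if n < 2:
--         return False
--     d = n - 1
--     s = 0
--     while d & 1 == 0:
--         s += 1
--         d >>= 1
--
--     x = pow(b, d, n)
--     if x == 1 or x == n - 1:
--         return True
--
--     for r in range(1, s):
--         x = (x * x) % n
--         if x == 1:
--             return False
--         elif x == n - 1:
--             return True
--
--     return False
--
-- def is_lucas_prp(n, D):
--
--     Q = (1 - D) >> 2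
--
--     # n+1 = 2**r*s where s is odd
--     s = n + 1
--     r = 0
--     while s & 1 == 0:
--         r += 1
--         s >>= 1
--
--     # calculate the bit reversal of (odd) s
--     # e.g. 19 (10011) <=> 25 (11001)
--     t = 0
--     while s:
--         if s & 1:
--             t += 1
--             s -= 1
--         else:
--             t <<= 1
--             s >>= 1
--
--     # use the same bit reversal process to calculate the sth Lucas number
--     # keep track of q = Q**n as we go
--     U = 0
--     V = 2
--     q = 1
--     # mod_inv(2, n)
--     inv_2 = (n + 1) >> 1
--     while t:
--         if t & 1:
--             # U, V of n+1
--             U, V = ((U + V) * inv_2) % n, ((D * U + V) * inv_2) % n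
--             q = (q * Q) % n
--             t -= 1
--         else:
--             # U, V of n*2
--             U, V = (U * V) % n, (V * V - 2 * q) % n
--             q = (q * q) % n
--             t >>= 1
--
--     # double s until we have the 2**r*sth Lucas number
--     while r:
--         U, V = (U * V) % n, (V * V - 2 * q) % n
--         q = (q * q) % n
--         r -= 1
--
--     # primality check
--     # if n is prime, n divides the n+1st Lucas number, given the assumptions
--     return U == 0
--
-- def is_bpsw(n):
--     if not is_sprp(n, 2):
--         return False
--
--     # idea shamelessly stolen from Mathmatica's PrimeQ
--     # if n is a 2-sprp and a 3-sprp, n is necessarily square-free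
--     if not is_sprp(n, 3):
--         return False
--
--     a = 5
--     s = 2
--     # if n is a perfect square, this will never terminate
--     while legendre(a, n) != n - 1:
--         s = -s
--         a = s - a
--     return is_lucas_prp(n, a)
-- ===== SOURCE B (Python) =====
-- def legendre(a, m):
--     return pow(a, (m - 1) >> 1, m)
--
-- def is_sprp(n, b=2):
--     if n < 2:
--         return False
--     d = n - 1
--     s = 0
--     while d & 1 == 0:
--         s += 1
--         d >>= 1
--
--     x = pow(b, d, n)
--     if x == 1 or x == n - 1:
--         return True
--
--     for r in range(1, s):
--         x = (x * x) % n
--         if x == 1: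
--             return False
--         elif x == n - 1:
--             return True
--
--     return False
--
-- def is_lucas_prp(n, D):
--     # U_{n+1} is the bottom-left entry of the matrix power [[1, -Q], [1, 0]]**(n+1)
--     # (the companion matrix of the Lucas recurrence with P = 1); compute that power
--     # mod n by recursive square-and-multiply, no (U, V, q) state and no half-inverse.
--     Q = (1 - D) >> 2
--
--     def mul(A, B):
--         a, b, c, d = A
--         e, f, g, h = B
--         return ((a * e + b * g) % n, (a * f + b * h) % n,
--                 (c * e + d * g) % n, (c * f + d * h) % n)
--
--     def mpow(m):
--         if m == 0:
--             return (1, 0, 0, 1)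
--         S = mpow(m >> 1)
--         S = mul(S, S)
--         if m & 1:
--             S = mul(S, (1, -Q, 1, 0))
--         return S
--
--     return mpow(n + 1)[2] == 0
--
-- def is_bpsw(n):
--     if not is_sprp(n, 2):
--         return False
--
--     if not is_sprp(n, 3):
--         return False
--
--     a = 5
--     s = 2
--     while legendre(a, n) != n - 1:
--         s = -s
--         a = s - a
--     return is_lucas_prp(n, a)
-- ===== Notes on version B (the rewrite author's own statement) =====
-- stated objective: alternative
-- what changed: is_lucas_prp now computes U_{n+1} mod n as the bottom-left entry of the companion matrix [[1,-Q],[1,0]] raised to the (n+1)-th power by recursive square-and-multiply, instead of A's (U,V,q) Lucas ladder driven by a bit-reversal of the odd part of n+1 with a modular half-inverse; is_sprp, legendre and the Selfridge D-search are unchanged.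
import Mathlib
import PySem

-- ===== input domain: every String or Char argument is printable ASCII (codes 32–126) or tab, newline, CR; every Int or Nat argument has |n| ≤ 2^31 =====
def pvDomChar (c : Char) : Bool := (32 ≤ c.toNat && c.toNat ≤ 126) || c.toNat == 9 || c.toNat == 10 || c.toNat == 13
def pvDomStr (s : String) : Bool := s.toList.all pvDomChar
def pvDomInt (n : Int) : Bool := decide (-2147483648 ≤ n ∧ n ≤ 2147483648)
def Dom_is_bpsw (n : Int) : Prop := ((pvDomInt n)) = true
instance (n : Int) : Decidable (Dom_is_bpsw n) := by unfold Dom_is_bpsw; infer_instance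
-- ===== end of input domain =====

-- B computes U_{n+1} mod n as an entry of a 2x2 companion-matrix power (square-and-multiply)
-- instead of A's (U,V,q) ladder over a bit-reversed exponent (objective: alternative, same cost).

-- ===== PORT A =====

-- pow(a, (m-1) >> 1, m); exact at the call sites (odd m ≥ 3, so the exponent is nonnegative)
def legendre (a m : Int) : Int := PySem.Int.powMod a ((m - 1) >>> (1:Nat)).toNat m

-- the `while d & 1 == 0: s += 1; d >>= 1` loop of is_sprp / is_lucas_prp, on the
-- positive d the call sites produce; returns (s, final odd d)
def split2 (d : Nat) : Nat × Nat :=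
  if h : d % 2 = 0 ∧ d ≠ 0 then
    let p := split2 (d / 2)
    (p.1 + 1, p.2)
  else (0, d)
  termination_by d
  decreasing_by exact Nat.div_lt_self (Nat.pos_of_ne_zero h.2) (by norm_num)

-- `for r in range(1, s): x = x*x % n; …` with k = number of remaining iterations
def sprpLoop (n : Int) : Int → Nat → Bool
  | _, 0 => false
  | x, k + 1 =>
    let x' := PySem.Int.mod (x * x) n
    if x' = 1 then false
    else if x' = n - 1 then true
    else sprpLoop n x' k

def is_sprp (n b : Int) : Bool :=
  if n < 2 then false
  else
    let sd := split2 (n - 1).toNat   -- exact: n ≥ 2 here, so n-1 ≥ 1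
    let x := PySem.Int.powMod b sd.2 n
    if x = 1 ∨ x = n - 1 then true
    else sprpLoop n x (sd.1 - 1)

-- the bit-reversal loop `while s: if s&1: t += 1; s -= 1 else: t <<= 1; s >>= 1`
def revbits (s t : Nat) : Nat :=
  if h : s = 0 then t
  else if s % 2 = 1 then revbits (s - 1) (t + 1) else revbits (s / 2) (2 * t)
  termination_by s
  decreasing_by
  · exact Nat.sub_lt (Nat.pos_of_ne_zero h) one_pos
  · exact Nat.div_lt_self (Nat.pos_of_ne_zero h) (by norm_num)

-- U, V = (U*V) % n, (V*V - 2*q) % n; q = (q*q) % n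
def lucasDbl (n : Int) (st : Int × Int × Int) : Int × Int × Int :=
  (PySem.Int.mod (st.1 * st.2.1) n,
   PySem.Int.mod (st.2.1 * st.2.1 - 2 * st.2.2) n,
   PySem.Int.mod (st.2.2 * st.2.2) n)

-- U, V = ((U+V)*inv_2) % n, ((D*U+V)*inv_2) % n; q = (q*Q) % n
def lucasInc (n D Q i2 : Int) (st : Int × Int × Int) : Int × Int × Int :=
  (PySem.Int.mod ((st.1 + st.2.1) * i2) n,
   PySem.Int.mod ((D * st.1 + st.2.1) * i2) n,
   PySem.Int.mod (st.2.2 * Q) n)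

-- A's `while t:` loop consuming the bit-reversed t
def lucasLoopA (n D Q i2 : Int) (t : Nat) (st : Int × Int × Int) : Int × Int × Int :=
  if h : t = 0 then st
  else if t % 2 = 1 then lucasLoopA n D Q i2 (t - 1) (lucasInc n D Q i2 st)
  else lucasLoopA n D Q i2 (t / 2) (lucasDbl n st)
  termination_by t
  decreasing_by
  · exact Nat.sub_lt (Nat.pos_of_ne_zero h) one_pos
  · exact Nat.div_lt_self (Nat.pos_of_ne_zero h) (by norm_num)

-- `while r:` doubling loop
def dblLoop (n : Int) (st : Int × Int × Int) : Nat → Int × Int × Int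
  | 0 => st
  | r + 1 => dblLoop n (lucasDbl n st) r

def is_lucas_prp (n D : Int) : Bool :=
  let Q := (1 - D) >>> (2:Nat)
  let rs := split2 (n + 1).toNat    -- exact: the call sites have n ≥ 3
  let t := revbits rs.2 0
  let i2 := (n + 1) >>> (1:Nat)
  let st := lucasLoopA n D Q i2 t (0, 2, 1)
  (dblLoop n st rs.1).1 == 0

-- `while legendre(a, n) != n - 1: s = -s; a = s - a`, fuel-bounded only to be total
-- (the fuel is never exhausted on the inputs is_bpsw reaches)
def dsearch (n : Int) : Nat → Int → Int → Option Int
  | 0, _, _ => none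
  | fuel + 1, a, s => if legendre a n ≠ n - 1 then dsearch n fuel (-s - a) (-s) else some a

def is_bpsw (n : Int) : Bool :=
  if !is_sprp n 2 then false
  else if !is_sprp n 3 then false
  else
    match dsearch n 4294967296 5 2 with
    | none => false
    | some a => is_lucas_prp n a

-- ===== PORT B =====

-- 2x2 matrix product with every entry reduced mod n (B's `mul`)
def matMulMod (n : Int) (A B : Int × Int × Int × Int) : Int × Int × Int × Int :=
  (PySem.Int.mod (A.1 * B.1 + A.2.1 * B.2.2.1) n,
   PySem.Int.mod (A.1 * B.2.1 + A.2.1 * B.2.2.2) n,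
   PySem.Int.mod (A.2.2.1 * B.1 + A.2.2.2 * B.2.2.1) n,
   PySem.Int.mod (A.2.2.1 * B.2.1 + A.2.2.2 * B.2.2.2) n)

-- B's recursive `mpow`: square the half power, multiply by the base on an odd bit
def matPowMod (n Q : Int) (m : Nat) : Int × Int × Int × Int :=
  if h : m = 0 then (1, 0, 0, 1)
  else
    let S := matMulMod n (matPowMod n Q (m / 2)) (matPowMod n Q (m / 2))
    if m % 2 = 1 then matMulMod n S (1, -Q, 1, 0) else S
  termination_by m
  decreasing_by
  all_goals exact Nat.div_lt_self (Nat.pos_of_ne_zero h) (by norm_num)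

def is_lucas_prp_alt (n D : Int) : Bool :=
  let Q := (1 - D) >>> (2:Nat)
  (matPowMod n Q (n + 1).toNat).2.2.1 == 0

def is_bpsw_alt (n : Int) : Bool :=
  if !is_sprp n 2 then false
  else if !is_sprp n 3 then false
  else
    match dsearch n 4294967296 5 2 with
    | none => false
    | some a => is_lucas_prp_alt n a

-- ===== PRECONDITION & SPEC =====
def Spec_is_bpsw (n : Int) (out : Bool) : Prop := out = is_bpsw_alt n
instance (n : Int) (out : Bool) : Decidable (Spec_is_bpsw n out) := by unfold Spec_is_bpsw; infer_instance

-- ===== CLAIM (what is proved, stated in full; the proofs are below) =====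
def Claim_equal_is_bpsw : Prop := ∀ (n : Int), Dom_is_bpsw n → Spec_is_bpsw n (is_bpsw n)

-- ===== LEMMAS AND PROOFS =====

-- Lucas sequences U, V with P = 1 and parameter Q (so that D = 1 - 4Q)
def lU (Q : Int) : Nat → Int
  | 0 => 0
  | 1 => 1
  | k + 2 => lU Q (k + 1) - Q * lU Q k

def lV (Q : Int) : Nat → Int
  | 0 => 2
  | 1 => 1
  | k + 2 => lV Q (k + 1) - Q * lV Q k

theorem lUV_step (Q : Int) : ∀ k, 2 * lU Q (k + 1) = lU Q k + lV Q k ∧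
    2 * lV Q (k + 1) = (1 - 4 * Q) * lU Q k + lV Q k := by
  intro k
  induction k with
  | zero => refine ⟨?_, ?_⟩ <;> simp [lU, lV]
  | succ k ih =>
    constructor
    · have h : (2:Int) * (2 * lU Q (k + 1 + 1)) = 2 * (lU Q (k + 1) + lV Q (k + 1)) := by
        show (2:Int) * (2 * lU Q (k + 2)) = _
        simp only [lU]
        linear_combination ih.1 - ih.2
      exact mul_left_cancel₀ two_ne_zero h
    · have h : (2:Int) * (2 * lV Q (k + 1 + 1)) = 2 * ((1 - 4 * Q) * lU Q (k + 1) + lV Q (k + 1)) := by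
        show (2:Int) * (2 * lV Q (k + 2)) = _
        simp only [lV]
        linear_combination ih.2 - (1 - 4 * Q) * ih.1
      exact mul_left_cancel₀ two_ne_zero h

theorem lUV_add (Q : Int) (m : Nat) : ∀ k,
    2 * lU Q (m + k) = lU Q m * lV Q k + lV Q m * lU Q k ∧
    2 * lV Q (m + k) = lV Q m * lV Q k + (1 - 4 * Q) * (lU Q m * lU Q k) := by
  intro k
  induction k with
  | zero => refine ⟨?_, ?_⟩ <;> simp [lU, lV] <;> ring_nf
  | succ k ih =>
    have hm := lUV_step Q (m + k)
    have hk := lUV_step Q k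
    have hmk : m + (k + 1) = (m + k) + 1 := by ring
    constructor
    · have h : (2:Int) * (2 * lU Q (m + (k + 1))) =
          2 * (lU Q m * lV Q (k + 1) + lV Q m * lU Q (k + 1)) := by
        rw [hmk]
        linear_combination 2 * hm.1 + ih.1 + ih.2 - lU Q m * hk.2 - lV Q m * hk.1
      exact mul_left_cancel₀ two_ne_zero h
    · have h : (2:Int) * (2 * lV Q (m + (k + 1))) =
          2 * (lV Q m * lV Q (k + 1) + (1 - 4 * Q) * (lU Q m * lU Q (k + 1))) := by
        rw [hmk]
        linear_combination 2 * hm.2 + (1 - 4 * Q) * ih.1 + ih.2 - lV Q m * hk.2 -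
          (1 - 4 * Q) * lU Q m * hk.1
      exact mul_left_cancel₀ two_ne_zero h

theorem lUV_norm (Q : Int) : ∀ k, lV Q k ^ 2 - (1 - 4 * Q) * lU Q k ^ 2 = 4 * Q ^ k := by
  intro k
  induction k with
  | zero => simp [lU, lV]
  | succ k ih =>
    have h := lUV_step Q k
    have h4 : (4:Int) * (lV Q (k + 1) ^ 2 - (1 - 4 * Q) * lU Q (k + 1) ^ 2) =
        4 * (4 * Q ^ (k + 1)) := by
      linear_combination (2 * lV Q (k + 1) + (1 - 4 * Q) * lU Q k + lV Q k) * h.2 -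
        (1 - 4 * Q) * (2 * lU Q (k + 1) + lU Q k + lV Q k) * h.1 + 4 * Q * ih
    exact mul_left_cancel₀ (by norm_num : (4:Int) ≠ 0) h4

theorem lU_dbl (Q : Int) (k : Nat) : lU Q (2 * k) = lU Q k * lV Q k := by
  have h := (lUV_add Q k k).1
  rw [two_mul]
  linarith [h]

theorem lV_dbl (Q : Int) (k : Nat) : lV Q (2 * k) = lV Q k * lV Q k - 2 * Q ^ k := by
  have h := (lUV_add Q k k).2
  have hn := lUV_norm Q k
  rw [two_mul]
  nlinarith [h, hn]

-- the canonical state at index k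
def LF (n Q : Int) (k : Nat) : Int × Int × Int := (lU Q k % n, lV Q k % n, Q ^ k % n)

theorem lucasDbl_LF (n Q : Int) (hn : 0 < n) (k : Nat) :
    lucasDbl n (LF n Q k) = LF n Q (2 * k) := by
  have hU : lU Q k % n ≡ lU Q k [ZMOD n] := Int.emod_emod _ _
  have hV : lV Q k % n ≡ lV Q k [ZMOD n] := Int.emod_emod _ _
  have hq : Q ^ k % n ≡ Q ^ k [ZMOD n] := Int.emod_emod _ _
  simp only [lucasDbl, LF, PySem.Int.mod_eq_emod_of_pos hn]
  refine Prod.ext ?_ (Prod.ext ?_ ?_) <;> simp only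
  · rw [lU_dbl]
    exact hU.mul hV
  · rw [lV_dbl]
    exact (hV.mul hV).sub (Int.ModEq.mul_left 2 hq)
  · rw [two_mul, pow_add]
    exact hq.mul hq

theorem lucasInc_LF (n D Q : Int) (hn : 0 < n) (hodd : n % 2 = 1) (hD : D = 1 - 4 * Q) (k : Nat) :
    lucasInc n D Q ((n + 1) >>> (1:Nat)) (LF n Q k) = LF n Q (k + 1) := by
  have hi2 : ((n + 1) >>> (1:Nat)) = (n + 1) / 2 := by
    simp [Int.shiftRight_eq_div_pow]
  have h2 : 2 * ((n + 1) / 2) = n + 1 := Int.mul_ediv_cancel' (by omega)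
  have hmod1 : (n + 1 : Int) ≡ 1 [ZMOD n] := by
    have h0 : (n : Int) ≡ 0 [ZMOD n] := by unfold Int.ModEq; simp
    exact (zero_add (1:Int)) ▸ h0.add_right 1
  have hstep := lUV_step Q k
  have hU : lU Q k % n ≡ lU Q k [ZMOD n] := Int.emod_emod _ _
  have hV : lV Q k % n ≡ lV Q k [ZMOD n] := Int.emod_emod _ _
  have hq : Q ^ k % n ≡ Q ^ k [ZMOD n] := Int.emod_emod _ _
  simp only [lucasInc, LF, PySem.Int.mod_eq_emod_of_pos hn, hi2]
  refine Prod.ext ?_ (Prod.ext ?_ ?_) <;> simp only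
  · calc (lU Q k % n + lV Q k % n) * ((n + 1) / 2)
        ≡ (lU Q k + lV Q k) * ((n + 1) / 2) [ZMOD n] := (hU.add hV).mul_right _
      _ = lU Q (k + 1) * (2 * ((n + 1) / 2)) := by rw [← hstep.1]; ring
      _ = lU Q (k + 1) * (n + 1) := by rw [h2]
      _ ≡ lU Q (k + 1) * 1 [ZMOD n] := hmod1.mul_left _
      _ = lU Q (k + 1) := mul_one _
  · calc (D * (lU Q k % n) + lV Q k % n) * ((n + 1) / 2)
        ≡ (D * lU Q k + lV Q k) * ((n + 1) / 2) [ZMOD n] :=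
          ((Int.ModEq.mul_left D hU).add hV).mul_right _
      _ = lV Q (k + 1) * (2 * ((n + 1) / 2)) := by rw [hD, ← hstep.2]; ring
      _ = lV Q (k + 1) * (n + 1) := by rw [h2]
      _ ≡ lV Q (k + 1) * 1 [ZMOD n] := hmod1.mul_left _
      _ = lV Q (k + 1) := mul_one _
  · rw [pow_succ]
    exact hq.mul_right Q

-- index evolution of A's `while t:` loop
def Gidx (t k : Nat) : Nat :=
  if h : t = 0 then k
  else if t % 2 = 1 then Gidx (t - 1) (k + 1) else Gidx (t / 2) (2 * k)
  termination_by t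
  decreasing_by
  · exact Nat.sub_lt (Nat.pos_of_ne_zero h) one_pos
  · exact Nat.div_lt_self (Nat.pos_of_ne_zero h) (by norm_num)

theorem lucasLoopA_LF (n D Q : Int) (hn : 0 < n) (hodd : n % 2 = 1) (hD : D = 1 - 4 * Q) :
    ∀ t k, lucasLoopA n D Q ((n + 1) >>> (1:Nat)) t (LF n Q k) = LF n Q (Gidx t k) := by
  intro t
  induction t using Nat.strong_induction_on with
  | _ t ih =>
    intro k
    rw [lucasLoopA, Gidx]
    split_ifs with h0 ho
    · rfl
    · rw [lucasInc_LF n D Q hn hodd hD k]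
      exact ih (t - 1) (Nat.sub_lt (Nat.pos_of_ne_zero h0) one_pos) (k + 1)
    · rw [lucasDbl_LF n Q hn k]
      exact ih (t / 2) (Nat.div_lt_self (Nat.pos_of_ne_zero h0) (by norm_num)) (2 * k)

-- scale factor of the bit reversal
def Esc (s : Nat) : Nat :=
  if h : s = 0 then 1
  else if s % 2 = 1 then Esc (s - 1) else 2 * Esc (s / 2)
  termination_by s
  decreasing_by
  · exact Nat.sub_lt (Nat.pos_of_ne_zero h) one_pos
  · exact Nat.div_lt_self (Nat.pos_of_ne_zero h) (by norm_num)

-- consuming the bit reversal of s advances the index by s (relative to the continuation t)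
theorem Gidx_revbits : ∀ s t k, (s % 2 = 1 → t % 2 = 0) → (s % 2 = 0 → s = 0 ∨ 0 < t) →
    Gidx (revbits s t) k = Gidx t (k * Esc s + s) := by
  intro s
  induction s using Nat.strong_induction_on with
  | _ s ih =>
    intro t k h1 h2
    rw [revbits]
    by_cases h0 : s = 0
    · subst h0
      rw [dif_pos rfl, Esc]
      simp
    · rw [dif_neg h0]
      by_cases hso : s % 2 = 1
      · rw [if_pos hso]
        have ht : t % 2 = 0 := h1 hso
        have ihs := ih (s - 1) (Nat.sub_lt (Nat.pos_of_ne_zero h0) one_pos) (t + 1) k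
          (by omega) (by omega)
        rw [ihs]
        have hu : Gidx (t + 1) (k * Esc (s - 1) + (s - 1)) =
            Gidx t (k * Esc (s - 1) + (s - 1) + 1) := by
          rw [Gidx, dif_neg (by omega : ¬ t + 1 = 0), if_pos (by omega : (t + 1) % 2 = 1)]
          simp
        rw [hu]
        have hEs : Esc s = Esc (s - 1) := by rw [Esc, dif_neg h0, if_pos hso]
        have harg : k * Esc (s - 1) + (s - 1) + 1 = k * Esc s + s := by
          rw [hEs]; omega
        rw [harg]
      · rw [if_neg hso]
        have ht : 0 < t := by
          rcases h2 (by omega) with h | h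
          · exact absurd h h0
          · exact h
        have ihs := ih (s / 2) (Nat.div_lt_self (Nat.pos_of_ne_zero h0) (by norm_num)) (2 * t) k
          (by omega) (by omega)
        rw [ihs]
        have hu : Gidx (2 * t) (k * Esc (s / 2) + s / 2) =
            Gidx t (2 * (k * Esc (s / 2) + s / 2)) := by
          rw [Gidx, dif_neg (by omega : ¬ 2 * t = 0), if_neg (by omega : ¬ (2 * t) % 2 = 1)]
          rw [(by omega : 2 * t / 2 = t)]
        rw [hu]
        have hEs : Esc s = 2 * Esc (s / 2) := by rw [Esc, dif_neg h0, if_neg hso]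
        have hmul : k * (2 * Esc (s / 2)) = 2 * (k * Esc (s / 2)) := by ring
        have harg : 2 * (k * Esc (s / 2) + s / 2) = k * Esc s + s := by
          rw [hEs, hmul]; omega
        rw [harg]

theorem dblLoop_LF (n Q : Int) (hn : 0 < n) :
    ∀ r k, dblLoop n (LF n Q k) r = LF n Q (2 ^ r * k) := by
  intro r
  induction r with
  | zero => intro k; simp [dblLoop]
  | succ r ih =>
    intro k
    show dblLoop n (lucasDbl n (LF n Q k)) r = _
    rw [lucasDbl_LF n Q hn k, ih (2 * k)]
    congr 1
    ring

theorem split2_odd : ∀ d, d ≠ 0 → (split2 d).2 % 2 = 1 := by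
  intro d
  induction d using Nat.strong_induction_on with
  | _ d ih =>
    intro hd
    rw [split2]
    split_ifs with h
    · exact ih (d / 2) (Nat.div_lt_self (Nat.pos_of_ne_zero hd) (by norm_num)) (by omega)
    · simp only
      omega

theorem split2_spec : ∀ d, 2 ^ (split2 d).1 * (split2 d).2 = d := by
  intro d
  induction d using Nat.strong_induction_on with
  | _ d ih =>
    rw [split2]
    split_ifs with h
    · have hih := ih (d / 2) (Nat.div_lt_self (Nat.pos_of_ne_zero h.2) (by norm_num))
      simp only [pow_succ]
      have hr : 2 ^ (split2 (d / 2)).1 * 2 * (split2 (d / 2)).2 =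
          2 * (2 ^ (split2 (d / 2)).1 * (split2 (d / 2)).2) := by ring
      omega
    · simp

theorem split2_even_eq (d : Nat) (h : d % 2 = 1) : split2 d = (0, d) := by
  rw [split2, dif_neg (by omega)]

-- exact (unreduced) companion-matrix power: entries are Lucas U values and lW values
def lW (Q : Int) : Nat → Int
  | 0 => 1
  | 1 => 0
  | k + 2 => lW Q (k + 1) - Q * lW Q k

theorem lW_eq (Q : Int) : ∀ k, lW Q (k + 1) = -Q * lU Q k := by
  intro k
  induction k using Nat.strong_induction_on with
  | _ k ih =>
    match k with
    | 0 => simp [lW, lU]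
    | 1 => simp [lW, lU]
    | k + 2 =>
      have h1 := ih (k + 1) (by omega)
      have h2 := ih k (by omega)
      show lW Q (k + 2) - Q * lW Q (k + 1) = -Q * (lU Q (k + 1) - Q * lU Q k)
      rw [h1, h2]
      ring

theorem lUW_shift (Q : Int) : ∀ k, lU Q k + lW Q k = lU Q (k + 1) := by
  intro k
  match k with
  | 0 => simp [lU, lW]
  | k + 1 =>
    rw [lW_eq]
    show lU Q (k + 1) + -Q * lU Q k = lU Q (k + 2)
    simp only [lU]
    ring

-- exact matrix product (B's mul without the reduction)
def emul (A B : Int × Int × Int × Int) : Int × Int × Int × Int :=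
  (A.1 * B.1 + A.2.1 * B.2.2.1, A.1 * B.2.1 + A.2.1 * B.2.2.2,
   A.2.2.1 * B.1 + A.2.2.2 * B.2.2.1, A.2.2.1 * B.2.1 + A.2.2.2 * B.2.2.2)

def EM (Q : Int) (m : Nat) : Int × Int × Int × Int := (lU Q (m + 1), lW Q (m + 1), lU Q m, lW Q m)

theorem EM_succ (Q : Int) (b : Nat) : emul (EM Q b) (1, -Q, 1, 0) = EM Q (b + 1) := by
  simp only [emul, EM]
  refine Prod.ext ?_ (Prod.ext ?_ (Prod.ext ?_ ?_)) <;> simp only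
  · have := lUW_shift Q (b + 1)
    show lU Q (b + 1) * 1 + lW Q (b + 1) * 1 = lU Q (b + 2)
    linarith
  · show lU Q (b + 1) * -Q + lW Q (b + 1) * 0 = lW Q (b + 2)
    rw [lW_eq Q (b + 1)]
    ring
  · have := lUW_shift Q b
    show lU Q b * 1 + lW Q b * 1 = lU Q (b + 1)
    linarith
  · show lU Q b * -Q + lW Q b * 0 = lW Q (b + 1)
    rw [lW_eq Q b]
    ring

theorem emul_assoc (A B C : Int × Int × Int × Int) : emul (emul A B) C = emul A (emul B C) := by
  obtain ⟨a, b, c, d⟩ := A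
  obtain ⟨e, f, g, h⟩ := B
  obtain ⟨i, j, k, l⟩ := C
  simp only [emul]
  refine Prod.ext ?_ (Prod.ext ?_ (Prod.ext ?_ ?_)) <;> simp only <;> ring

theorem EM_add (Q : Int) (a : Nat) : ∀ b, EM Q (a + b) = emul (EM Q a) (EM Q b) := by
  intro b
  induction b with
  | zero =>
    simp only [EM, Nat.add_zero, emul]
    show _ = (lU Q (a+1) * lU Q 1 + lW Q (a+1) * lU Q 0, lU Q (a+1) * lW Q 1 + lW Q (a+1) * lW Q 0,
              lU Q a * lU Q 1 + lW Q a * lU Q 0, lU Q a * lW Q 1 + lW Q a * lW Q 0)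
    simp [lU, lW]
  | succ b ih =>
    have h : a + (b + 1) = (a + b) + 1 := by omega
    rw [h, ← EM_succ Q (a + b), ih, emul_assoc, EM_succ]

-- entrywise congruence mod n
def mcong (n : Int) (A B : Int × Int × Int × Int) : Prop :=
  A.1 ≡ B.1 [ZMOD n] ∧ A.2.1 ≡ B.2.1 [ZMOD n] ∧ A.2.2.1 ≡ B.2.2.1 [ZMOD n] ∧ A.2.2.2 ≡ B.2.2.2 [ZMOD n]

theorem matMulMod_cong (n : Int) (hn : 0 < n) (A A' B B' : Int × Int × Int × Int)
    (hA : mcong n A A') (hB : mcong n B B') : mcong n (matMulMod n A B) (emul A' B') := by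
  obtain ⟨a1, a2, a3, a4⟩ := hA
  obtain ⟨b1, b2, b3, b4⟩ := hB
  simp only [matMulMod, emul, mcong, PySem.Int.mod_eq_emod_of_pos hn]
  refine ⟨?_, ?_, ?_, ?_⟩ <;>
    exact (Int.emod_emod _ _).trans (((by assumption : _ ≡ _ [ZMOD n]).mul (by assumption)).add
      ((by assumption : _ ≡ _ [ZMOD n]).mul (by assumption)))

theorem matPowMod_cong (n Q : Int) (hn : 0 < n) :
    ∀ m, mcong n (matPowMod n Q m) (EM Q m) := by
  intro m
  induction m using Nat.strong_induction_on with
  | _ m ih =>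
    rw [matPowMod.eq_def]
    by_cases h0 : m = 0
    · subst h0
      rw [dif_pos rfl]
      exact ⟨by simp [EM, lU, lW], by simp [EM, lU, lW], by simp [EM, lU, lW], by simp [EM, lU, lW]⟩
    · rw [dif_neg h0]
      have ihh := ih (m / 2) (Nat.div_lt_self (Nat.pos_of_ne_zero h0) (by norm_num))
      have hsq : mcong n (matMulMod n (matPowMod n Q (m / 2)) (matPowMod n Q (m / 2)))
          (EM Q (m / 2 + m / 2)) := by
        rw [EM_add]
        exact matMulMod_cong n hn _ _ _ _ ihh ihh
      by_cases hodd : m % 2 = 1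
      · rw [if_pos hodd]
        have hb : mcong n ((1, -Q, 1, 0) : Int × Int × Int × Int) (EM Q 1) := by
          refine ⟨?_, ?_, ?_, ?_⟩ <;> simp [EM, lU, lW]
        have := matMulMod_cong n hn _ _ _ _ hsq hb
        rw [← EM_add, (by omega : m / 2 + m / 2 + 1 = m)] at this
        exact this
      · rw [if_neg hodd]
        rw [(by omega : m / 2 + m / 2 = m)] at hsq
        exact hsq

-- B's bottom-left entry is exactly lU Q m % n (for m ≠ 0 it is a reduced residue)
theorem matPowMod_bl (n Q : Int) (hn : 0 < n) (m : Nat) (hm : m ≠ 0) :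
    (matPowMod n Q m).2.2.1 = lU Q m % n := by
  have hc := (matPowMod_cong n Q hn m).2.2.1
  have hred : (matPowMod n Q m).2.2.1 % n = (matPowMod n Q m).2.2.1 := by
    rw [matPowMod.eq_def, dif_neg hm]
    split_ifs <;>
      simp [matMulMod, PySem.Int.mod_eq_emod_of_pos hn, Int.emod_emod_of_dvd _ (dvd_refl n)]
  have : (matPowMod n Q m).2.2.1 % n = lU Q m % n := hc
  rw [hred] at this
  exact this

theorem lucas_eq (n D : Int) (hn : 3 ≤ n) (hodd : n % 2 = 1) (hD4 : D % 4 = 1) :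
    is_lucas_prp n D = is_lucas_prp_alt n D := by
  have hn0 : 0 < n := by omega
  have hQdiv : ((1 - D) >>> (2:Nat)) = (1 - D) / 4 := by
    simp [Int.shiftRight_eq_div_pow]
  have hDQ : D = 1 - 4 * ((1 - D) >>> (2:Nat)) := by
    rw [hQdiv]
    have h4 : (4:Int) ∣ (1 - D) := by omega
    have := Int.mul_ediv_cancel' h4
    omega
  have hstart : ((0:Int), (2:Int), (1:Int)) = LF n ((1 - D) >>> (2:Nat)) 0 := by
    simp only [LF, lU, lV, pow_zero]
    rw [Int.zero_emod, Int.emod_eq_of_lt (by norm_num) (by omega),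
      Int.emod_eq_of_lt (by norm_num) (by omega)]
  have hs_ne : (n + 1).toNat ≠ 0 := by omega
  have hsodd : (split2 (n + 1).toNat).2 % 2 = 1 := split2_odd _ hs_ne
  have hA : lucasLoopA n D ((1 - D) >>> (2:Nat)) ((n + 1) >>> (1:Nat))
      (revbits (split2 (n + 1).toNat).2 0) (0, 2, 1) =
      LF n ((1 - D) >>> (2:Nat)) (split2 (n + 1).toNat).2 := by
    rw [hstart, lucasLoopA_LF n D _ hn0 hodd hDQ _ 0,
      Gidx_revbits _ 0 0 (fun _ => rfl) (fun hc => absurd hsodd (by omega)),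
      Gidx, dif_pos rfl]
    simp
  simp only [is_lucas_prp, is_lucas_prp_alt]
  rw [hA, dblLoop_LF n _ hn0, split2_spec (n + 1).toNat,
    matPowMod_bl n _ hn0 (n + 1).toNat hs_ne]
  simp [LF]

theorem sprp2_facts (n : Int) (h : is_sprp n 2 = true) : 3 ≤ n ∧ n % 2 = 1 := by
  by_cases hn2 : n < 2
  · rw [is_sprp, if_pos hn2] at h
    exact absurd h (by simp)
  · have hge : 2 ≤ n := by omega
    by_cases he : n % 2 = 1
    · exact ⟨by omega, he⟩
    · exfalso
      have heven : n % 2 = 0 := by omega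
      have hd1 : (1:Nat) ≤ (n - 1).toNat := by omega
      have hdodd : (n - 1).toNat % 2 = 1 := by omega
      rw [is_sprp, if_neg hn2] at h
      simp only [split2_even_eq _ hdodd] at h
      have hx : PySem.Int.powMod 2 (n - 1).toNat n = 2 ^ (n - 1).toNat % n :=
        PySem.Int.powMod_eq_emod 2 _ (by omega)
      have hxe : (2 ^ (n - 1).toNat % n) % 2 = 0 := by
        rw [Int.emod_emod_of_dvd _ (by omega : (2:Int) ∣ n)]
        have : (2:Int) ∣ 2 ^ (n - 1).toNat := dvd_pow_self 2 (by omega)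
        omega
      rw [hx] at h
      rw [if_neg (by omega)] at h
      simp [sprpLoop] at h

theorem dsearch_mod4 (n : Int) : ∀ fuel (a s x : Int), a % 4 = 1 → s % 4 = 2 →
    dsearch n fuel a s = some x → x % 4 = 1 := by
  intro fuel
  induction fuel with
  | zero => intro a s x _ _ h; simp [dsearch] at h
  | succ fuel ihf =>
    intro a s x ha hs h
    rw [dsearch] at h
    split at h
    · exact ihf (-s - a) (-s) x (by omega) (by omega) h
    · cases h
      exact ha

-- ===== VERDICT (by name: the statement is the Claim_ definition above) =====
theorem is_bpsw_spec : Claim_equal_is_bpsw := by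
  intro n _
  unfold Spec_is_bpsw is_bpsw is_bpsw_alt
  by_cases h2 : is_sprp n 2 = true
  · by_cases h3 : is_sprp n 3 = true
    · simp only [h2, h3, Bool.not_true, Bool.false_eq_true, if_false]
      obtain ⟨hn, hodd⟩ := sprp2_facts n h2
      cases hd : dsearch n 4294967296 5 2 with
      | none => rfl
      | some a =>
        exact lucas_eq n a hn hodd (dsearch_mod4 n _ 5 2 a (by norm_num) (by norm_num) hd)
    · simp [h2, h3]
  · simp [h2]
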